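-- pv_equiv track=rewrite | github.com/theauclt/projetTDD_2026_structure | main.py | determiner_conference_nba
-- ===== SOURCE A (Python) =====
-- def determiner_conference_nba(nom_equipe):
--     """Détermine si une équipe est à l'Est ou à l'Ouest en fonction de son nom."""
--     mots_cles_est = [
--         "Boston", "Celtics", "Brooklyn", "Nets", "New York", "Knicks",
--         "Philadelphia", "76ers", "Toronto", "Raptors", "Chicago", "Bulls",
--         "Cleveland", "Cavaliers", "Detroit", "Pistons", "Indiana", "Pacers",
--         "Milwaukee", "Bucks", "Atlanta", "Hawks", "Charlotte", "Hornets",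
--         "Miami", "Heat", "Orlando", "Magic", "Washington", "Wizards"
--     ]
--
--     # Si on trouve un de ces mots dans le nom de l'équipe, c'est l'Est
--     for mot in mots_cles_est:
--         if mot.lower() in nom_equipe.lower():
--             return "Est"
--
--     # Sinon, c'est forcément l'Ouest
--     return "Ouest"
-- ===== SOURCE B (Python) =====
-- def determiner_conference_nba(nom_equipe):
--     """Détermine si une équipe est à l'Est ou à l'Ouest en fonction de son nom."""
--     mots_cles_est = [
--         "boston", "celtics", "brooklyn", "nets", "new york", "knicks",
--         "philadelphia", "76ers", "toronto", "raptors", "chicago", "bulls",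
--         "cleveland", "cavaliers", "detroit", "pistons", "indiana", "pacers",
--         "milwaukee", "bucks", "atlanta", "hawks", "charlotte", "hornets",
--         "miami", "heat", "orlando", "magic", "washington", "wizards"
--     ]
--     # Build a trie (prefix tree) of the lowered keywords once.
--     END = "$end$"
--     root = {}
--     for mot in mots_cles_est:
--         node = root
--         for ch in mot:
--             node = node.setdefault(ch, {})
--         node[END] = True
--     # One scan over the name: from each position, walk the trie.
--     s = nom_equipe.lower()
--     for i in range(len(s)):
--         node = root
--         for j in range(i, len(s) + 1):
--             if END in node:
--                 return "Est"
--             if j == len(s):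
--                 break
--             node = node.get(s[j])
--             if node is None:
--                 break
--     return "Ouest"
-- ===== Notes on version B (the rewrite author's own statement) =====
-- stated objective: alternative
-- what changed: Replaces A's per-keyword substring search by building a trie (prefix tree) of the pre-lowered keywords once and then walking the trie from each position of the lowered name, so the inner per-keyword loop disappears entirely.
import Mathlib
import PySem

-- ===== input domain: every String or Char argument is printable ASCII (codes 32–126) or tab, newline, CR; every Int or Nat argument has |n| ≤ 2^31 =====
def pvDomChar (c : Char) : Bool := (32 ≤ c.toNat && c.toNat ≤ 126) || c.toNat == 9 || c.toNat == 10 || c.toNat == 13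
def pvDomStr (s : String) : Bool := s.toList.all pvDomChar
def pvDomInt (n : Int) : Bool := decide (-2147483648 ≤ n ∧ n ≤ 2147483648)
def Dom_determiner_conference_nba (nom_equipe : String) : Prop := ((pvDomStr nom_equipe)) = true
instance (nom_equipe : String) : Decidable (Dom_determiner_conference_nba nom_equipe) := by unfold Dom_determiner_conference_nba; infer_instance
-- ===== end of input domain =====

-- B builds a trie of the pre-lowered keywords once and walks it from each position of
-- the lowered name (different data structure removing A's per-keyword loop; same cost class).

-- ===== PORT A =====
def pvMotsClesEst : List String :=
  ["Boston", "Celtics", "Brooklyn", "Nets", "New York", "Knicks",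
   "Philadelphia", "76ers", "Toronto", "Raptors", "Chicago", "Bulls",
   "Cleveland", "Cavaliers", "Detroit", "Pistons", "Indiana", "Pacers",
   "Milwaukee", "Bucks", "Atlanta", "Hawks", "Charlotte", "Hornets",
   "Miami", "Heat", "Orlando", "Magic", "Washington", "Wizards"]

-- the for-loop with early return: 'if mot.lower() in nom_equipe.lower(): return "Est"'
def pvALoop (nom_equipe : String) : List String → String
  | [] => "Ouest"
  | mot :: rest =>
      if PySem.Str.isIn (PySem.Str.lower mot) (PySem.Str.lower nom_equipe) then "Est"
      else pvALoop nom_equipe rest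

def determiner_conference_nba (nom_equipe : String) : String :=
  pvALoop nom_equipe pvMotsClesEst

-- ===== PORT B =====
def pvMotsLower : List String :=
  ["boston", "celtics", "brooklyn", "nets", "new york", "knicks",
   "philadelphia", "76ers", "toronto", "raptors", "chicago", "bulls",
   "cleveland", "cavaliers", "detroit", "pistons", "indiana", "pacers",
   "milwaukee", "bucks", "atlanta", "hawks", "charlotte", "hornets",
   "miami", "heat", "orlando", "magic", "washington", "wizards"]

-- Source B's nested-dict trie: a node is an END flag plus an ordered child map (mutual pair,
-- exact image of {'$end$': True, ch: subdict, ...})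
mutual
inductive PvTrie where
  | node : Bool → PvChildren → PvTrie
inductive PvChildren where
  | nil : PvChildren
  | cons : Char → PvTrie → PvChildren → PvChildren
end

def pvEmpty : PvTrie := .node false .nil

-- node.get(ch): first matching child
def pvChildGet : PvChildren → Char → Option PvTrie
  | .nil, _ => none
  | .cons d t rest, c => if d = c then some t else pvChildGet rest c

-- node.setdefault(ch, {}) followed by the recursive insertion into that child
def pvChildIns (ins : PvTrie → PvTrie) (c : Char) : PvChildren → PvChildren
  | .nil => .cons c (ins pvEmpty) .nil
  | .cons d t rest => if d = c then .cons d (ins t) rest else .cons d t (pvChildIns ins c rest)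

-- the 'for ch in mot' build loop for one keyword; final node gets END
def pvInsert : List Char → PvTrie → PvTrie
  | [], .node _ cs => .node true cs
  | c :: m, .node a cs => .node a (pvChildIns (pvInsert m) c cs)

-- the 'for mot in mots_cles_est' build loop
def pvRoot : PvTrie := pvMotsLower.foldl (fun t m => pvInsert m.toList t) pvEmpty

-- the inner j-loop: END check first, then stop at end of string or missing child
def pvWalk : PvTrie → List Char → Bool
  | .node a _, [] => a
  | .node a cs, c :: r =>
      a || (match pvChildGet cs c with
            | none => false
            | some t => pvWalk t r)

-- the 'for i in range(len(s))' loop with early return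
def pvBScan (s : List Char) : List Nat → String
  | [] => "Ouest"
  | i :: rest => if pvWalk pvRoot (s.drop i) then "Est" else pvBScan s rest

def determiner_conference_nba_alt (nom_equipe : String) : String :=
  let s := PySem.Chars.lower nom_equipe.toList
  pvBScan s (List.range s.length)

-- ===== PRECONDITION & SPEC =====
def Spec_determiner_conference_nba (nom_equipe : String) (out : String) : Prop := out = determiner_conference_nba_alt nom_equipe
instance (nom_equipe : String) (out : String) : Decidable (Spec_determiner_conference_nba nom_equipe out) := by unfold Spec_determiner_conference_nba; infer_instance

-- ===== CLAIM (what is proved, stated in full; the proofs are below) =====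
def Claim_equal_determiner_conference_nba : Prop := ∀ (nom_equipe : String), Dom_determiner_conference_nba nom_equipe → Spec_determiner_conference_nba nom_equipe (determiner_conference_nba nom_equipe)

-- ===== LEMMAS AND PROOFS =====

theorem pvIfOr (c d : Bool) (x y : String) :
    (if c then x else if d then x else y) = if c || d then x else y := by
  cases c <;> simp

theorem pvALoop_eq (nom_equipe : String) (ms : List String) :
    pvALoop nom_equipe ms =
      if ms.any (fun m => PySem.Str.isIn (PySem.Str.lower m) (PySem.Str.lower nom_equipe))
      then "Est" else "Ouest" := by
  induction ms with
  | nil => simp [pvALoop]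
  | cons m rest ih =>
      simp only [pvALoop, List.any_cons]
      rw [ih, pvIfOr]; rfl

theorem pvBScan_eq (s : List Char) (is : List Nat) :
    pvBScan s is = if is.any (fun i => pvWalk pvRoot (s.drop i)) then "Est" else "Ouest" := by
  induction is with
  | nil => simp [pvBScan]
  | cons i rest ih =>
      simp only [pvBScan, List.any_cons]
      rw [ih, pvIfOr]; rfl

-- trie correctness
theorem pvWalk_empty (l : List Char) : pvWalk pvEmpty l = false := by
  cases l <;> simp [pvWalk, pvEmpty, pvChildGet]

theorem pvChildGet_childIns (ins : PvTrie → PvTrie) (c : Char) :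
    ∀ (cs : PvChildren) (d : Char),
    pvChildGet (pvChildIns ins c cs) d =
      if d = c then some (ins ((pvChildGet cs c).getD pvEmpty)) else pvChildGet cs d
  | .nil, d => by
      by_cases h : d = c
      · subst h; simp [pvChildIns, pvChildGet]
      · simp only [pvChildIns, pvChildGet, if_neg h, if_neg (Ne.symm h)]
  | .cons e t rest, d => by
      simp only [pvChildIns]
      by_cases he : e = c
      · subst he
        rw [if_pos rfl]
        by_cases hd : d = e
        · subst hd; simp [pvChildGet]
        · simp only [pvChildGet, if_neg hd, if_neg (Ne.symm hd)]
      · rw [if_neg he]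
        by_cases hd : d = e
        · subst hd
          simp [pvChildGet, if_neg he]
        · simp only [pvChildGet, if_neg (Ne.symm hd), if_neg he,
            pvChildGet_childIns ins c rest d]

theorem pvWalk_insert (m : List Char) : ∀ (t : PvTrie) (l : List Char),
    pvWalk (pvInsert m t) l = (pvWalk t l || decide (m <+: l)) := by
  induction m with
  | nil =>
      intro t l
      obtain ⟨a, cs⟩ := t
      cases l <;> simp [pvInsert, pvWalk]
  | cons c m ih =>
      intro t l
      obtain ⟨a, cs⟩ := t
      cases l with
      | nil => simp [pvInsert, pvWalk]
      | cons d r =>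
          simp only [pvInsert, pvWalk, pvChildGet_childIns]
          by_cases hd : d = c
          · subst hd
            rw [if_pos rfl]
            cases hg : pvChildGet cs d with
            | none =>
                simp only [Option.getD_none]
                simp [ih, pvWalk_empty, List.cons_prefix_cons]
            | some t0 =>
                simp only [Option.getD_some]
                simp [ih, Bool.or_assoc, List.cons_prefix_cons]
          · rw [if_neg hd]
            have : ¬ (c :: m <+: d :: r) := by
              simp [List.cons_prefix_cons]; intro h; exact absurd h.symm hd
            simp [this]

theorem pvWalk_root (l : List Char) :
    pvWalk pvRoot l = pvMotsLower.any (fun m => decide (m.toList <+: l)) := by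
  have gen : ∀ (ms : List String) (t : PvTrie),
      pvWalk (ms.foldl (fun t m => pvInsert m.toList t) t) l =
        (pvWalk t l || ms.any (fun m => decide (m.toList <+: l))) := by
    intro ms
    induction ms with
    | nil => intro t; simp
    | cons m rest ih =>
        intro t
        simp only [List.foldl_cons, List.any_cons, ih, pvWalk_insert, Bool.or_assoc]
  rw [pvRoot, gen, pvWalk_empty, Bool.false_or]

-- lowering A's keywords gives exactly B's keyword literals
theorem pvMots_lower : pvMotsClesEst.map (fun m => PySem.Chars.lower m.toList) = pvMotsLower.map String.toList := by
  decide

theorem pvMots_ne_nil : ∀ m ∈ pvMotsLower, m.toList ≠ [] := by decide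

-- a nonempty keyword occurs as a substring iff it is a prefix at some in-range position
theorem pvInfix_iff (m s : List Char) (hm : m ≠ []) :
    PySem.Chars.isIn m s = true ↔ ∃ i ∈ List.range s.length, m <+: s.drop i := by
  rw [PySem.Chars.isIn_iff_infix]
  constructor
  · intro h
    obtain ⟨j, hj⟩ := (List.infix_iff_prefix_suffix ..).mp h
    obtain ⟨pre, hpre⟩ := hj.2
    refine ⟨pre.length, ?_, ?_⟩
    · simp only [List.mem_range]
      have hlen : pre.length + j.length = s.length := by
        rw [← hpre]; simp
      have : j.length ≠ 0 := by
        intro h0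
        exact hm (List.eq_nil_of_prefix_nil (List.length_eq_zero_iff.mp h0 ▸ hj.1))
      omega
    · have : s.drop pre.length = j := by
        rw [← hpre]; simp
      rw [this]; exact hj.1
  · rintro ⟨i, _, hpre⟩
    exact hpre.isInfix.trans (List.drop_suffix i s).isInfix

theorem pvChars_lower_toList (nom : String) :
    (PySem.Str.lower nom).toList = PySem.Chars.lower nom.toList := by
  simp [PySem.Str.toList_lower]

-- ===== VERDICT (by name: the statement is the Claim_ definition above) =====
theorem determiner_conference_nba_spec : Claim_equal_determiner_conference_nba := by
  intro nom _
  unfold Spec_determiner_conference_nba determiner_conference_nba determiner_conference_nba_alt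
  rw [pvALoop_eq, pvBScan_eq]
  have key :
      (pvMotsClesEst.any (fun m => PySem.Str.isIn (PySem.Str.lower m) (PySem.Str.lower nom))) =
      ((List.range (PySem.Chars.lower nom.toList).length).any
        (fun i => pvWalk pvRoot ((PySem.Chars.lower nom.toList).drop i))) := by
    set s := PySem.Chars.lower nom.toList with hs
    simp only [pvWalk_root]
    have hA : ∀ m : String, PySem.Str.isIn (PySem.Str.lower m) (PySem.Str.lower nom) =
        PySem.Chars.isIn (PySem.Chars.lower m.toList) s := by
      intro m
      rw [PySem.Str.isIn_eq, pvChars_lower_toList, pvChars_lower_toList, hs]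
    rw [Bool.eq_iff_iff]
    simp only [List.any_eq_true, hA, List.mem_range, decide_eq_true_eq]
    constructor
    · rintro ⟨m, hm, h⟩
      have hm' : PySem.Chars.lower m.toList ∈ pvMotsLower.map String.toList := by
        rw [← pvMots_lower]; exact List.mem_map_of_mem hm
      obtain ⟨m', hm'mem, hm'eq⟩ := List.mem_map.mp hm'
      have hne : PySem.Chars.lower m.toList ≠ [] := by
        rw [← hm'eq]; exact pvMots_ne_nil m' hm'mem
      obtain ⟨i, hi, hpre⟩ := (pvInfix_iff _ s hne).mp h
      exact ⟨i, List.mem_range.mp hi, m', hm'mem, by rw [hm'eq]; exact hpre⟩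
    · rintro ⟨i, hi, m', hm'mem, h⟩
      have hm' : m'.toList ∈ pvMotsClesEst.map (fun m => PySem.Chars.lower m.toList) := by
        rw [pvMots_lower]; exact List.mem_map_of_mem hm'mem
      obtain ⟨m, hmmem, hmeq⟩ := List.mem_map.mp hm'
      refine ⟨m, hmmem, ?_⟩
      exact (pvInfix_iff _ s (by rw [hmeq]; exact pvMots_ne_nil m' hm'mem)).mpr
        ⟨i, List.mem_range.mpr hi, by rw [hmeq]; exact h⟩
  rw [key]
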